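-- pv_equiv track=rewrite | github.com/AkhrorKhasanov/PythonAcmp | Numerologist.py | solve
-- ===== SOURCE A (Python) =====
-- def solve(s, c):
--     if len(s) < 2:
--         return s, c
--     k = 0
--     for i in s:
--         k += int(i)
--     k = str(k)
--     c += 1
--     return solve(k, c)
-- ===== SOURCE B (Python) =====
-- def solve(s, c):
--     # Iterative reduction: repeatedly replace s by the string of its digit sum,
--     # counting steps, until fewer than 2 characters remain.
--     while len(s) >= 2:
--         s = str(sum(int(ch) for ch in s))
--         c += 1
--     return s, c
-- ===== Notes on version B (the rewrite author's own statement) =====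
-- stated objective: idiomatic
-- what changed: Replaces the tail recursion and the explicit accumulator loop with an iterative while-loop that rebinds s and uses sum() over a generator.
import Mathlib
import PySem

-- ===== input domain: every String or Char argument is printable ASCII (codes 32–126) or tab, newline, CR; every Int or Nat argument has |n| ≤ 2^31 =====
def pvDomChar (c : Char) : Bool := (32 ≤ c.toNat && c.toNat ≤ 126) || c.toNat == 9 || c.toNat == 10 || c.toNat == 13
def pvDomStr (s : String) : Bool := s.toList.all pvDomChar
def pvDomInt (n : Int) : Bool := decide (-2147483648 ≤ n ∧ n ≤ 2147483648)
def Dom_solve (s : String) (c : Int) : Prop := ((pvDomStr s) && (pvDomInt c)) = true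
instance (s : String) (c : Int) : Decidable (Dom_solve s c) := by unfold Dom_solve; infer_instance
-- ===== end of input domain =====

-- B rewrites A's tail recursion as an iterative while-loop using sum(); return values are identical on Pre_.

-- ===== PORT A =====
-- int(i) for the single char i; the ValueError case (none) is defaulted to 0, unreachable inside Pre_solve.
def pvAIntOf (ch : Char) : Int := (PySem.Int.ofStr? (String.mk [ch])).getD 0

-- Tail recursion of A, with a fuel guard for totality only: inside Pre_solve the
-- recursion makes at most len(s)+2 calls, so the fuel never runs out there.
def solveGo : Nat → String → Int → String × Int
  | 0, s, c => (s, c)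
  | fuel + 1, s, c =>
    if PySem.Str.len s < 2 then (s, c)
    else
      let k : Int := s.toList.foldl (fun k i => k + pvAIntOf i) 0
      solveGo fuel (PySem.Int.toStr k) (c + 1)

def solve (s : String) (c : Int) : String × Int := solveGo (s.toList.length + 2) s c

-- ===== PORT B =====
-- int(ch); the ValueError case (none) is defaulted to 0, unreachable inside Pre_solve.
def pvBIntOf (ch : Char) : Int := (PySem.Int.ofStr? (String.mk [ch])).getD 0

-- One iteration of the while-body: s = str(sum(int(ch) for ch in s)); c += 1
def pvBStep (st : String × Int) : String × Int :=
  (PySem.Int.toStr ((st.1.toList.map pvBIntOf).sum), st.2 + 1)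

-- The while-loop, with a fuel guard for totality only (same bound as above).
def solveAltLoop : Nat → String × Int → String × Int
  | 0, st => st
  | fuel + 1, st => if 2 ≤ PySem.Str.len st.1 then solveAltLoop fuel (pvBStep st) else st

def solve_alt (s : String) (c : Int) : String × Int := solveAltLoop (s.toList.length + 2) (s, c)

-- ===== PRECONDITION & SPEC =====
-- Pre_ excludes exactly the inputs where Python A raises ValueError: len(s) ≥ 2 with some non-digit char.
def Pre_solve (s : String) (c : Int) : Prop :=
  PySem.Str.len s < 2 ∨ PySem.Str.strIsdigit s = true
instance (s : String) (c : Int) : Decidable (Pre_solve s c) := by unfold Pre_solve; infer_instance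

def pvWitness_solve : String × Int := ("1234", 0)

def Spec_solve (s : String) (c : Int) (out : String × Int) : Prop := out = solve_alt s c
instance (s : String) (c : Int) (out : String × Int) : Decidable (Spec_solve s c out) := by unfold Spec_solve; infer_instance

-- ===== CLAIM (what is proved, stated in full; the proofs are below) =====
def Claim_equal_solve : Prop := ∀ (s : String) (c : Int), Dom_solve s c → Pre_solve s c → Spec_solve s c (solve s c)

-- ===== LEMMAS AND PROOFS =====

lemma pv_foldl_eq_sum (f : Char → Int) :
    ∀ (l : List Char) (a : Int), l.foldl (fun k i => k + f i) a = a + (l.map f).sum := by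
  intro l
  induction l with
  | nil => intro a; simp
  | cons x xs ih => intro a; simp [List.foldl, ih, add_assoc]

lemma pv_go_eq : ∀ (fuel : Nat) (s : String) (c : Int),
    solveGo fuel s c = solveAltLoop fuel (s, c) := by
  intro fuel
  induction fuel with
  | zero => intro s c; rfl
  | succ f ih =>
    intro s c
    simp only [solveGo, solveAltLoop]
    by_cases h : PySem.Str.len s < 2
    · rw [if_pos h, if_neg (by omega)]
    · rw [if_neg h, if_pos (by omega), ih]
      have : pvBIntOf = pvAIntOf := rfl
      simp [pvBStep, this, pv_foldl_eq_sum pvAIntOf]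

-- ===== VERDICT (by name: the statement is the Claim_ definition above) =====
theorem solve_spec : Claim_equal_solve := by
  intro s c _ _
  show solve s c = solve_alt s c
  unfold solve solve_alt
  exact pv_go_eq _ s c
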